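-- pv_equiv track=rewrite | github.com/VladArchikristo/fixcraftvp | fixcraft-backup-20260501-134709/seo-articles/masha_scraper.py | clean_article
-- ===== SOURCE A (Python) =====
-- def clean_article(text):
--     # Убираем мета-информацию пользователя, оставляем только статью
--     lines = text.split('\n')
--     cleaned = []
--     in_article = False
--
--     for line in lines:
--         if line.startswith('#'):
--             in_article = True
--         if in_article:
--             cleaned.append(line)
--
--     return '\n'.join(cleaned) if cleaned else text
-- ===== SOURCE B (Python) =====
-- def clean_article(text):
--     lines = text.split('\n')
--     for i, line in enumerate(lines):
--         if line.startswith('#'):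
--             return '\n'.join(lines[i:])
--     return text
-- ===== Notes on version B (the rewrite author's own statement) =====
-- stated objective: simpler
-- what changed: Replaces the boolean-flag accumulator loop over all lines with an early-returning search for the first heading line followed by a single slice-and-join (find-index-then-slice instead of conditional append).
import Mathlib
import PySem

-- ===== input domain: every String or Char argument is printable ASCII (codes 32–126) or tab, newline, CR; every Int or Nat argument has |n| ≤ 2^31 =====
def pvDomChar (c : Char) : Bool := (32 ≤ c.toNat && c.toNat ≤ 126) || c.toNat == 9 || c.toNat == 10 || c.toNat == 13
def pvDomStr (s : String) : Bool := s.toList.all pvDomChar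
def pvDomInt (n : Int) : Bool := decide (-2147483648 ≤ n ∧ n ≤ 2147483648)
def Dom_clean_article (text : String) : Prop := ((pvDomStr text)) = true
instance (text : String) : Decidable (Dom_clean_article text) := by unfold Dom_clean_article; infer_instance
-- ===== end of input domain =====

-- B replaces A's boolean-flag accumulator loop with find-first-heading-then-slice-and-join (simpler decomposition).

-- ===== PORT A =====
def cleanAStep (st : List String × Bool) (line : String) : List String × Bool :=
  let ina := if PySem.Str.startswith line "#" then true else st.2
  let cleaned := if ina then st.1 ++ [line] else st.1
  (cleaned, ina)

-- text.split('\n') with nonempty sep never fails: split? returns some; .getD [] is exact here.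
def clean_article (text : String) : String :=
  let lines := (PySem.Str.split? text "\n").getD []
  let st := lines.foldl cleanAStep ([], false)
  if st.1 ≠ [] then PySem.Str.join "\n" st.1 else text

-- ===== PORT B =====
-- B's loop with early return: scan for the first line starting with '#'; at index i, lines[i:] is l :: rest.
def cleanGo (text : String) : List String → String
  | [] => text
  | l :: rest =>
    if PySem.Str.startswith l "#" then PySem.Str.join "\n" (l :: rest)
    else cleanGo text rest

def clean_article_alt (text : String) : String :=
  cleanGo text ((PySem.Str.split? text "\n").getD [])

-- ===== PRECONDITION & SPEC =====
def Spec_clean_article (text : String) (out : String) : Prop := out = clean_article_alt text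
instance (text : String) (out : String) : Decidable (Spec_clean_article text out) := by unfold Spec_clean_article; infer_instance

-- ===== CLAIM (what is proved, stated in full; the proofs are below) =====
def Claim_equal_clean_article : Prop := ∀ (text : String), Dom_clean_article text → Spec_clean_article text (clean_article text)

-- ===== LEMMAS AND PROOFS =====
-- the suffix of lines from the first heading (empty if none)
def headSuffix : List String → List String
  | [] => []
  | l :: rest => if PySem.Str.startswith l "#" then l :: rest else headSuffix rest

theorem foldl_cleanAStep_true (lines : List String) (acc : List String) :
    lines.foldl cleanAStep (acc, true) = (acc ++ lines, true) := by
  induction lines generalizing acc with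
  | nil => simp
  | cons l rest ih =>
    simp [List.foldl, cleanAStep, ih]

theorem foldl_cleanAStep_false (lines : List String) (acc : List String) :
    (lines.foldl cleanAStep (acc, false)).1 = acc ++ headSuffix lines := by
  induction lines generalizing acc with
  | nil => simp [headSuffix]
  | cons l rest ih =>
    by_cases h : PySem.Chars.startswith l.toList ['#'] = true
    · simp [List.foldl, cleanAStep, h, headSuffix, foldl_cleanAStep_true]
    · simp [List.foldl, cleanAStep, h, headSuffix, ih]

theorem cleanGo_eq (text : String) (lines : List String) :
    cleanGo text lines =
      if headSuffix lines = [] then text else PySem.Str.join "\n" (headSuffix lines) := by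
  induction lines with
  | nil => simp [cleanGo, headSuffix]
  | cons l rest ih =>
    by_cases h : PySem.Chars.startswith l.toList ['#'] = true
    · simp [cleanGo, headSuffix, h]
    · simp [cleanGo, headSuffix, h, ih]

-- ===== VERDICT (by name: the statement is the Claim_ definition above) =====
theorem clean_article_spec : Claim_equal_clean_article := by
  intro text _
  unfold Spec_clean_article clean_article clean_article_alt
  rw [cleanGo_eq]
  simp only []
  rw [foldl_cleanAStep_false]
  simp only [List.nil_append]
  by_cases h : headSuffix ((PySem.Str.split? text "\n").getD []) = [] <;> simp [h]
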